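-- pv_equiv track=rewrite | github.com/ErPokerino/book_generator | backend/app/agent/draft_generator.py | parse_draft_output
-- ===== SOURCE A (Python) =====
-- def parse_draft_output(llm_output: str) -> tuple[str, str]:
--     """
--     Estrae titolo e trama dall'output del LLM.
--
--     Args:
--         llm_output: Output completo del LLM
--
--     Returns:
--         Tupla (title, draft_text)
--     """
--     lines = llm_output.split('\n')
--     title = None
--     draft_text = ""
--     found_title = False
--     found_trama = False
--
--     for i, line in enumerate(lines):
--         line_stripped = line.strip()
--
--         # Cerca "TITOLO:"
--         if not found_title and line_stripped.upper().startswith("TITOLO:"):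
--             title = line_stripped[7:].strip()  # Rimuove "TITOLO:"
--             found_title = True
--             continue
--
--         # Cerca "TRAMA:" o "TRAMA"
--         if not found_trama and (line_stripped.upper().startswith("TRAMA:") or line_stripped.upper() == "TRAMA"):
--             found_trama = True
--             # Se c'è testo dopo "TRAMA:", includilo
--             if line_stripped.upper().startswith("TRAMA:"):
--                 remaining = line_stripped[6:].strip()
--                 if remaining:
--                     draft_text = remaining + "\n"
--             continue
--
--         # Se abbiamo trovato "TRAMA:", aggiungi tutte le righe successive
--         if found_trama:
--             draft_text += line + "\n"
--
--     # Se non abbiamo trovato il formato previsto, usa tutto come draft_text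
--     if not found_title or not found_trama:
--         # Fallback: cerca il primo titolo markdown (# Titolo) o usa tutto come draft
--         if not found_title:
--             # Prova a estrarre un titolo markdown
--             for line in lines:
--                 if line.strip().startswith("# "):
--                     title = line.strip()[2:].strip()
--                     break
--             if not title:
--                 title = "Titolo non specificato"
--
--         if not found_trama:
--             draft_text = llm_output
--
--     return title or "Titolo non specificato", draft_text.strip()
-- ===== SOURCE B (Python) =====
-- def _is_title(line):
--     return line.strip().upper().startswith("TITOLO:")
--
--
-- def _is_trama(line):
--     s = line.strip().upper()
--     return s.startswith("TRAMA:") or s == "TRAMA"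
--
--
-- def parse_draft_output(llm_output: str) -> tuple[str, str]:
--     lines = llm_output.split('\n')
--
--     # Title: first TITOLO: line, else first markdown '# ' heading.
--     title_line = next((l for l in lines if _is_title(l)), None)
--     if title_line is not None:
--         title = title_line.strip()[7:].strip()
--     else:
--         md = next((l for l in lines if l.strip().startswith("# ")), None)
--         title = md.strip()[2:].strip() if md is not None else ""
--
--     # Draft: everything after the first TRAMA marker.
--     trama_idx = next((i for i, l in enumerate(lines) if _is_trama(l)), None)
--     if trama_idx is None:
--         draft = llm_output
--     else:
--         s = lines[trama_idx].strip()
--         parts = []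
--         if s.upper().startswith("TRAMA:"):
--             rem = s[6:].strip()
--             if rem:
--                 parts.append(rem)
--         draft = "\n".join(parts + lines[trama_idx + 1:])
--
--     return (title or "Titolo non specificato", draft.strip())
-- ===== Notes on version B (the rewrite author's own statement) =====
-- stated objective: simpler
-- what changed: Replaces A's single stateful loop with four flags by two independent phases: find the title line (or markdown fallback) directly, then join the lines after the first TRAMA marker; Pre_ excludes inputs whose first TITOLO: line appears only after the TRAMA marker, a malformed-format corner where A's one-pass loop plucks that line out of the body while a phase-split parse keeps the body intact, and either value is defensible.
import Mathlib
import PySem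

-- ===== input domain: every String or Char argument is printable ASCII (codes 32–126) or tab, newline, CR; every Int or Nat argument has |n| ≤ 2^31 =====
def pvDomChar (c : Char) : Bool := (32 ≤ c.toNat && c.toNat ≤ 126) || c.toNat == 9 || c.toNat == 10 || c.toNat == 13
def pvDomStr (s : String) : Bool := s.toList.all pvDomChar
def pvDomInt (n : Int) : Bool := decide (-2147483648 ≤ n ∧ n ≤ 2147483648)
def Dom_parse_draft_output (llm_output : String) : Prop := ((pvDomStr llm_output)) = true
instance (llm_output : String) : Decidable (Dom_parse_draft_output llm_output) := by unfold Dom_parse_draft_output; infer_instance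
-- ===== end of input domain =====

-- B replaces A's single stateful flag-driven loop by two independent phases (find the title line,
-- then join the lines after the first TRAMA marker); objective: simpler.

-- ===== PORT A =====
-- the main for-loop of A, state (title, draft_text, found_title, found_trama)
def pvA_loop : List (List Char) → Option (List Char) → List Char → Bool → Bool →
    Option (List Char) × List Char × Bool × Bool
  | [], title, draft, ft, fm => (title, draft, ft, fm)
  | line :: rest, title, draft, ft, fm =>
    let s := PySem.Chars.strip line
    if !ft && PySem.Chars.startswith (PySem.Chars.upper s) "TITOLO:".toList then
      pvA_loop rest (some (PySem.Chars.strip (s.drop 7))) draft true fm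
    else if !fm && (PySem.Chars.startswith (PySem.Chars.upper s) "TRAMA:".toList
                    || PySem.Chars.upper s == "TRAMA".toList) then
      let draft' :=
        if PySem.Chars.startswith (PySem.Chars.upper s) "TRAMA:".toList then
          (let rem := PySem.Chars.strip (s.drop 6);
           if rem ≠ [] then rem ++ ['\n'] else draft)
        else draft
      pvA_loop rest title draft' ft true
    else if fm then pvA_loop rest title (draft ++ line ++ ['\n']) ft fm
    else pvA_loop rest title draft ft fm

def parse_draft_output (llm_output : String) : String × String :=
  let lines := PySem.Chars.splitOn llm_output.toList ['\n']
  match pvA_loop lines none [] false false with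
  | (title, draft, ft, fm) =>
    let title :=
      if !ft then
        match lines.find? (fun l => PySem.Chars.startswith (PySem.Chars.strip l) "# ".toList) with
        | some l =>
          let cand := PySem.Chars.strip ((PySem.Chars.strip l).drop 2)
          some (if cand = [] then "Titolo non specificato".toList else cand)
        | none => some "Titolo non specificato".toList
      else title
    let draft := if !fm then llm_output.toList else draft
    let tfin :=
      match title with
      | none => "Titolo non specificato".toList
      | some s => if s = [] then "Titolo non specificato".toList else s
    (String.ofList tfin, String.ofList (PySem.Chars.strip draft))

-- ===== PORT B =====
def pvIsTitle (l : List Char) : Bool :=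
  PySem.Chars.startswith (PySem.Chars.upper (PySem.Chars.strip l)) "TITOLO:".toList

def pvIsTrama (l : List Char) : Bool :=
  let s := PySem.Chars.upper (PySem.Chars.strip l)
  PySem.Chars.startswith s "TRAMA:".toList || s == "TRAMA".toList

def pvIsMd (l : List Char) : Bool :=
  PySem.Chars.startswith (PySem.Chars.strip l) "# ".toList

-- first index satisfying p (the 'next((i for i, l in enumerate(lines) …))' of Source B),
-- kept as (prefix before first match, suffix from the first match) for the proofs
def pvSplitAtFirst (p : List Char → Bool) : List (List Char) → List (List Char) × List (List Char)
  | [] => ([], [])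
  | x :: xs =>
    if p x then ([], x :: xs)
    else
      let (a, b) := pvSplitAtFirst p xs
      (x :: a, b)

def parse_draft_output_alt (llm_output : String) : String × String :=
  let lines := PySem.Chars.splitOn llm_output.toList ['\n']
  let title :=
    match lines.find? pvIsTitle with
    | some l => PySem.Chars.strip ((PySem.Chars.strip l).drop 7)
    | none =>
      match lines.find? pvIsMd with
      | some md => PySem.Chars.strip ((PySem.Chars.strip md).drop 2)
      | none => []
  let title := if title = [] then "Titolo non specificato".toList else title
  let draft :=
    match pvSplitAtFirst pvIsTrama lines with
    | (_, []) => llm_output.toList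
    | (_, tline :: rest) =>
      let s := PySem.Chars.strip tline
      let parts :=
        if PySem.Chars.startswith (PySem.Chars.upper s) "TRAMA:".toList then
          (let rem := PySem.Chars.strip (s.drop 6);
           if rem = [] then [] else [rem])
        else []
      PySem.Chars.join ['\n'] (parts ++ rest)
  (String.ofList title, String.ofList (PySem.Chars.strip draft))

-- ===== PRECONDITION & SPEC =====
-- Pre_ excludes malformed inputs whose first TITOLO: line appears only AFTER the first TRAMA
-- marker (on which A still returns a value): there A's stateful loop removes that line from the
-- body while B keeps the body intact, and either value is defensible for an unspecified format.
def Pre_parse_draft_output (llm_output : String) : Prop :=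
  (pvSplitAtFirst pvIsTrama (PySem.Chars.splitOn llm_output.toList ['\n'])).2 = [] ∨
  (pvSplitAtFirst pvIsTrama (PySem.Chars.splitOn llm_output.toList ['\n'])).1.any pvIsTitle = true ∨
  ((pvSplitAtFirst pvIsTrama (PySem.Chars.splitOn llm_output.toList ['\n'])).2.drop 1).any pvIsTitle = false
instance (llm_output : String) : Decidable (Pre_parse_draft_output llm_output) := by
  unfold Pre_parse_draft_output; infer_instance

def pvWitness_parse_draft_output : String := "TITOLO: Il mare\nTRAMA: una storia\ndi onde"

def Spec_parse_draft_output (llm_output : String) (out : String × String) : Prop := out = parse_draft_output_alt llm_output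
instance (llm_output : String) (out : String × String) : Decidable (Spec_parse_draft_output llm_output out) := by unfold Spec_parse_draft_output; infer_instance

-- ===== CLAIM (what is proved, stated in full; the proofs are below) =====
def Claim_equal_parse_draft_output : Prop := ∀ (llm_output : String), Dom_parse_draft_output llm_output → Pre_parse_draft_output llm_output → Spec_parse_draft_output llm_output (parse_draft_output llm_output)

-- ===== LEMMAS AND PROOFS =====

-- proof-only abbreviations
def pvFlat (xs : List (List Char)) : List Char := (xs.map (· ++ ['\n'])).flatten

def pvTitleOf (l : List Char) : List Char :=
  PySem.Chars.strip ((PySem.Chars.strip l).drop 7)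

-- the list with its first element satisfying p removed (if any); A's loop does this to the body
def pvRemoveFirst (p : List Char → Bool) : List (List Char) → List (List Char)
  | [] => []
  | x :: xs => if p x then xs else x :: pvRemoveFirst p xs

-- draft contribution of the TRAMA line itself, as A builds it (with draft = "")
def pvHead (l : List Char) : List Char :=
  if PySem.Chars.startswith (PySem.Chars.upper (PySem.Chars.strip l)) "TRAMA:".toList then
    (let rem := PySem.Chars.strip ((PySem.Chars.strip l).drop 6);
     if rem ≠ [] then rem ++ ['\n'] else [])
  else []

-- what A's loop computes from the initial state, in B's vocabulary
def pvASpec (ls : List (List Char)) : Option (List Char) × List Char × Bool × Bool :=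
  let tl := ls.find? pvIsTitle
  match pvSplitAtFirst pvIsTrama ls with
  | (_, []) => (tl.map pvTitleOf, [], tl.isSome, false)
  | (pre, x :: rest) =>
    let rest' := if pre.any pvIsTitle then rest else pvRemoveFirst pvIsTitle rest
    (tl.map pvTitleOf, pvHead x ++ pvFlat rest', tl.isSome, true)

theorem pvTitle_not_trama (l : List Char) (h : pvIsTitle l = true) : pvIsTrama l = false := by
  unfold pvIsTitle at h
  unfold pvIsTrama
  rw [PySem.Chars.startswith_iff] at h
  obtain ⟨rest, hr⟩ := h
  rw [← hr]
  have h7 : "TITOLO:".toList = ['T','I','T','O','L','O',':'] := by rfl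
  have h6 : "TRAMA:".toList = ['T','R','A','M','A',':'] := by rfl
  have h5 : "TRAMA".toList = ['T','R','A','M','A'] := by rfl
  simp [h7, h6, h5, PySem.Chars.startswith, List.isPrefixOf]

theorem pvRemoveFirst_no_match (p : List Char → Bool) (ls : List (List Char))
    (h : ls.find? p = none) : pvRemoveFirst p ls = ls := by
  rw [List.find?_eq_none] at h
  induction ls with
  | nil => rfl
  | cons x xs ih =>
    have hx : p x = false := eq_false_of_ne_true (h x (by simp))
    simp [pvRemoveFirst, hx, ih (fun y hy => h y (List.mem_cons_of_mem _ hy))]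

theorem pvA_loop_tt (ls : List (List Char)) (t : Option (List Char)) (d : List Char) :
    pvA_loop ls t d true true = (t, d ++ pvFlat ls, true, true) := by
  induction ls generalizing d with
  | nil => simp [pvA_loop, pvFlat]
  | cons l rest ih => simp [pvA_loop, ih, pvFlat]

theorem pvA_loop_ft (ls : List (List Char)) (t : Option (List Char)) (d : List Char) :
    pvA_loop ls t d false true =
      match ls.find? pvIsTitle with
      | some l => (some (pvTitleOf l), d ++ pvFlat (pvRemoveFirst pvIsTitle ls), true, true)
      | none => (t, d ++ pvFlat ls, false, true) := by
  induction ls generalizing d with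
  | nil => simp [pvA_loop, pvFlat]
  | cons l rest ih =>
    by_cases hT : pvIsTitle l
    · have hT' := hT; unfold pvIsTitle at hT'
      simp only [pvA_loop]
      rw [hT']
      simp [List.find?_cons, hT, pvRemoveFirst, pvA_loop_tt, pvTitleOf]
    · have hT' : PySem.Chars.startswith (PySem.Chars.upper (PySem.Chars.strip l)) "TITOLO:".toList = false := by
        unfold pvIsTitle at hT; simpa using hT
      simp only [pvA_loop, hT', Bool.not_true, Bool.false_and, if_neg, Bool.not_false,
        Bool.true_and, Bool.and_false, Bool.false_eq_true, ite_false, ite_true]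
      rw [ih]
      rw [List.find?_cons]
      simp [hT, pvRemoveFirst, pvFlat]

theorem pvA_loop_tf (ls : List (List Char)) (t : Option (List Char)) :
    pvA_loop ls t [] true false =
      match pvSplitAtFirst pvIsTrama ls with
      | (_, []) => (t, [], true, false)
      | (_, x :: rest) => (t, pvHead x ++ pvFlat rest, true, true) := by
  induction ls with
  | nil => simp [pvA_loop, pvSplitAtFirst]
  | cons l rest ih =>
    by_cases hM : pvIsTrama l
    · have hM' := hM; simp only [pvIsTrama] at hM'
      simp only [pvA_loop, Bool.not_true, Bool.false_and, Bool.false_eq_true, if_false,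
        Bool.not_false, Bool.true_and]
      rw [hM']
      simp only [if_true, pvSplitAtFirst, hM]
      rw [pvA_loop_tt]
      simp [pvHead]
    · have hM' : (PySem.Chars.startswith (PySem.Chars.upper (PySem.Chars.strip l)) "TRAMA:".toList
          || PySem.Chars.upper (PySem.Chars.strip l) == "TRAMA".toList) = false := by
        simp only [pvIsTrama] at hM; simpa using hM
      simp only [pvA_loop]
      rw [hM']
      simp only [Bool.not_true, Bool.false_and, Bool.false_eq_true, if_false, Bool.not_false,
        Bool.true_and, Bool.and_false]
      rw [ih]
      simp [pvSplitAtFirst, hM]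
      cases hs : pvSplitAtFirst pvIsTrama rest with
      | mk a b => cases b <;> simp

theorem pvA_loop_spec (ls : List (List Char)) :
    pvA_loop ls none [] false false = pvASpec ls := by
  induction ls with
  | nil => simp [pvA_loop, pvASpec, pvSplitAtFirst]
  | cons l rest ih =>
    by_cases hT : pvIsTitle l
    · have hM : pvIsTrama l = false := pvTitle_not_trama l hT
      have hT' := hT; simp only [pvIsTitle] at hT'
      simp only [pvA_loop]
      rw [hT']
      simp only [Bool.not_false, Bool.true_and, if_true]
      rw [pvA_loop_tf]
      simp only [pvASpec, List.find?_cons, hT, pvSplitAtFirst, hM, Bool.false_eq_true, if_false]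
      cases hs : pvSplitAtFirst pvIsTrama rest with
      | mk a b =>
        cases b with
        | nil => simp [pvTitleOf]
        | cons x xs => simp [List.any_cons, hT, pvTitleOf]
    · have hT' : PySem.Chars.startswith (PySem.Chars.upper (PySem.Chars.strip l)) "TITOLO:".toList = false := by
        simp only [pvIsTitle] at hT; simpa using hT
      by_cases hM : pvIsTrama l
      · have hM' := hM; simp only [pvIsTrama] at hM'
        simp only [pvA_loop]
        rw [hT', hM']
        simp only [Bool.not_false, Bool.true_and, Bool.and_false, Bool.false_eq_true, if_false, if_true]
        rw [pvA_loop_ft]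
        simp only [pvASpec, List.find?_cons, hT, pvSplitAtFirst, hM, if_true, Bool.false_eq_true]
        cases hf : List.find? pvIsTitle rest with
        | none => simp [pvRemoveFirst_no_match pvIsTitle rest hf, pvHead, hT]
        | some w => simp [pvHead, hT]
      · have hM' : (PySem.Chars.startswith (PySem.Chars.upper (PySem.Chars.strip l)) "TRAMA:".toList
            || PySem.Chars.upper (PySem.Chars.strip l) == "TRAMA".toList) = false := by
          simp only [pvIsTrama] at hM; simpa using hM
        simp only [pvA_loop]
        rw [hT', hM']
        simp only [Bool.not_false, Bool.true_and, Bool.and_false, Bool.false_eq_true, if_false]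
        rw [ih]
        simp only [pvASpec, List.find?_cons, hT, pvSplitAtFirst, hM, Bool.false_eq_true, if_false]
        cases hs : pvSplitAtFirst pvIsTrama rest with
        | mk a b =>
          cases b with
          | nil => simp
          | cons x xs => simp [List.any_cons, hT]

theorem pvRstrip_append_newline (x : List Char) :
    PySem.Chars.rstrip (x ++ ['\n']) = PySem.Chars.rstrip x := by
  simp [PySem.Chars.rstrip, List.dropWhile, PySem.Chars.isspace]

theorem pvStrip_append_newline (x : List Char) :
    PySem.Chars.strip (x ++ ['\n']) = PySem.Chars.strip x := by
  simp only [PySem.Chars.strip, PySem.Chars.lstrip]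
  rw [List.dropWhile_append]
  cases hq : (List.dropWhile PySem.Chars.isspace x).isEmpty
  · simp [hq, pvRstrip_append_newline]
  · simp [hq]
    rw [List.isEmpty_iff] at hq
    simp [hq, PySem.Chars.rstrip, List.dropWhile, PySem.Chars.isspace]

theorem pvFlat_eq_join (x : List Char) (xs : List (List Char)) :
    pvFlat (x :: xs) = PySem.Chars.join ['\n'] (x :: xs) ++ ['\n'] := by
  induction xs generalizing x with
  | nil => simp [pvFlat, PySem.Chars.join_singleton]
  | cons y ys ih =>
    have : pvFlat (x :: y :: ys) = (x ++ ['\n']) ++ pvFlat (y :: ys) := by simp [pvFlat]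
    rw [this, ih y, PySem.Chars.join_cons_cons]
    simp

theorem pvStrip_flat_eq_strip_join (xs : List (List Char)) :
    PySem.Chars.strip (pvFlat xs) = PySem.Chars.strip (PySem.Chars.join ['\n'] xs) := by
  cases xs with
  | nil => simp [pvFlat, PySem.Chars.join_nil]
  | cons x ys => rw [pvFlat_eq_join, pvStrip_append_newline]

theorem pvFlat_append (a b : List (List Char)) : pvFlat (a ++ b) = pvFlat a ++ pvFlat b := by
  simp [pvFlat]

theorem pvDraft_eq (x : List Char) (r : List (List Char)) :
    PySem.Chars.strip (pvHead x ++ pvFlat r) =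
    PySem.Chars.strip (PySem.Chars.join ['\n']
      ((if PySem.Chars.startswith (PySem.Chars.upper (PySem.Chars.strip x)) "TRAMA:".toList then
          (let rem := PySem.Chars.strip ((PySem.Chars.strip x).drop 6);
           if rem = [] then [] else [rem]) else []) ++ r)) := by
  rw [← pvStrip_flat_eq_strip_join, pvFlat_append]
  have : pvHead x = pvFlat (if PySem.Chars.startswith (PySem.Chars.upper (PySem.Chars.strip x)) "TRAMA:".toList then
          (let rem := PySem.Chars.strip ((PySem.Chars.strip x).drop 6);
           if rem = [] then [] else [rem]) else []) := by
    unfold pvHead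
    by_cases h : PySem.Chars.startswith (PySem.Chars.upper (PySem.Chars.strip x)) "TRAMA:".toList
    · simp only [h, if_true]
      by_cases hr : PySem.Chars.strip ((PySem.Chars.strip x).drop 6) = [] <;> simp [hr, pvFlat]
    · rw [eq_false_of_ne_true h]
      simp [pvFlat]
  rw [this]

theorem pvMd_eta : (fun l => PySem.Chars.startswith (PySem.Chars.strip l) "# ".toList) = pvIsMd := rfl

theorem parse_draft_output_spec : Claim_equal_parse_draft_output := by
  intro llm _ hpre
  unfold Spec_parse_draft_output
  unfold parse_draft_output parse_draft_output_alt
  simp only [pvA_loop_spec, pvASpec, pvMd_eta]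
  unfold Pre_parse_draft_output at hpre
  cases hs : pvSplitAtFirst pvIsTrama (PySem.Chars.splitOn llm.toList ['\n']) with
  | mk pre post =>
    rw [hs] at hpre
    cases post with
    | nil =>
      cases hf : List.find? pvIsTitle (PySem.Chars.splitOn llm.toList ['\n']) with
      | none =>
        cases hm : List.find? pvIsMd (PySem.Chars.splitOn llm.toList ['\n']) with
        | none => simp [hs, hf, hm]
        | some md =>
          simp only [hs, hf, hm]
          by_cases hc : PySem.Chars.strip ((PySem.Chars.strip md).drop 2) = [] <;> simp [hc]
      | some tl =>
        by_cases hc : pvTitleOf tl = [] <;> simp [hs, hf, hc, pvTitleOf]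
    | cons x rest =>
      have hrest : (if pre.any pvIsTitle then rest else pvRemoveFirst pvIsTitle rest) = rest := by
        rcases hpre with h | h | h
        · simp at h
        · simp [h]
        · by_cases hp : pre.any pvIsTitle
          · simp [hp]
          · simp only [hp, Bool.false_eq_true, if_false]
            apply pvRemoveFirst_no_match
            rw [List.find?_eq_none]
            intro a ha
            have := List.any_eq_false.mp (by simpa using h) a ha
            simpa using this
      simp only [hs]
      rw [hrest]
      cases hf : List.find? pvIsTitle (PySem.Chars.splitOn llm.toList ['\n']) with
      | none =>
        cases hm : List.find? pvIsMd (PySem.Chars.splitOn llm.toList ['\n']) with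
        | none =>
          simp [hf, hm, pvDraft_eq]
          try rfl
        | some md =>
          simp only [hf, hm]
          by_cases hc : PySem.Chars.strip ((PySem.Chars.strip md).drop 2) = [] <;>
            simp [hc, pvDraft_eq] <;> try rfl
      | some tl =>
        by_cases hc : pvTitleOf tl = [] <;>
          simp [hf, hc, pvTitleOf, pvDraft_eq] <;> try rfl
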